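-- pv_equiv track=rewrite | github.com/chloeldgr/RAMSAI | 3D_printer/src/printer3d_manager/nodes/utility.py | work_on_gcode_file
-- ===== SOURCE A (Python) =====
-- def work_on_gcode_file(sequence):
--
--     delimiter = ';LAYER:'
--     final_delimiter = '; Default end code'
--     layers = [[]]
--
--     for line in sequence:
--         if (delimiter not in line) and (final_delimiter not in line):
--             if line[0] != ';':
--                 layers[-1].append(line)
--         else:
--             layers.append([])
--
--     return layers
-- ===== SOURCE B (Python) =====
-- def work_on_gcode_file(sequence):
--     seq = list(sequence)
--     delimiter = ';LAYER:'
--     final_delimiter = '; Default end code'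
--     bounds = [i for i, l in enumerate(seq) if delimiter in l or final_delimiter in l]
--     starts = [0] + [b + 1 for b in bounds]
--     ends = bounds + [len(seq)]
--     return [[l for l in seq[s:e] if l[0] != ';'] for s, e in zip(starts, ends)]
-- ===== Notes on version B (the rewrite author's own statement) =====
-- stated objective: alternative
-- what changed: Instead of one stateful loop that mutates the last layer of a seeded singleton list, B first computes the list of delimiter-line indices in one enumerate pass, derives segment start/end boundaries from it, and builds each layer as a filtered slice between consecutive boundaries.
import Mathlib
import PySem

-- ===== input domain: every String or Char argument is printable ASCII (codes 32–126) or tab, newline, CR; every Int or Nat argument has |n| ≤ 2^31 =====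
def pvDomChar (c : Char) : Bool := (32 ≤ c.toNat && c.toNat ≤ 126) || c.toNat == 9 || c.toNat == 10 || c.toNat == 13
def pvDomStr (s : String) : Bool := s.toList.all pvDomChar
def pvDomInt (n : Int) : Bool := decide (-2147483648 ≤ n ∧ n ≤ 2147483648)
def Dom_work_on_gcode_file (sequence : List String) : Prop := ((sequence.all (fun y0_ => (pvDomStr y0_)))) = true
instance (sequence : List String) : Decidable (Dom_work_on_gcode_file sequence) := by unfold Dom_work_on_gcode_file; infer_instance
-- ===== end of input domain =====

-- B replaces A's stateful loop (mutating the last layer in place) by a boundary-index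
-- pass followed by filtered slices between consecutive boundaries; same cost, different decomposition.

-- ===== PORT A =====
-- layers[-1].append(line)
def pvAppendLast (layers : List (List String)) (line : String) : List (List String) :=
  match layers with
  | [] => [[line]]
  | [x] => [x ++ [line]]
  | x :: xs => x :: pvAppendLast xs line

-- one iteration of A's loop body
def pvAStep (layers : List (List String)) (line : String) : List (List String) :=
  if !(PySem.Str.isIn ";LAYER:" line) && !(PySem.Str.isIn "; Default end code" line) then
    match PySem.Str.pyGet? line 0 with
    | some c => if c ≠ ';' then pvAppendLast layers line else layers
    | none => layers   -- Python raises IndexError here (empty line); excluded by Pre_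
  else layers ++ [[]]

def work_on_gcode_file (sequence : List String) : List (List String) :=
  sequence.foldl pvAStep [[]]

-- ===== PORT B =====
-- 'delimiter in l or final_delimiter in l'
def pvIsDelim (l : String) : Bool :=
  PySem.Str.isIn ";LAYER:" l || PySem.Str.isIn "; Default end code" l

-- the comprehension filter 'l[0] != ';''
def pvKeep (l : String) : Bool :=
  match PySem.Str.pyGet? l 0 with
  | some c => c ≠ ';'
  | none => false   -- Python raises IndexError here (empty line); excluded by Pre_

-- bounds = [i for i, l in enumerate(seq) if delimiter in l or final_delimiter in l]
def pvBounds (seq : List String) : List Int :=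
  ((PySem.List.enumerate seq).filter (fun p => pvIsDelim p.2)).map (·.1)

def work_on_gcode_file_alt (sequence : List String) : List (List String) :=
  let bounds := pvBounds sequence
  let starts : List Int := 0 :: bounds.map (· + 1)
  let ends : List Int := bounds ++ [(sequence.length : Int)]
  (starts.zip ends).map
    (fun p => (PySem.List.slice sequence (some p.1) (some p.2)).filter pvKeep)

-- ===== PRECONDITION & SPEC =====
-- Pre_ excludes sequences containing an empty line: there both Pythons raise IndexError on line[0].
def Pre_work_on_gcode_file (sequence : List String) : Prop := "" ∉ sequence
instance (sequence : List String) : Decidable (Pre_work_on_gcode_file sequence) := by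
  unfold Pre_work_on_gcode_file; infer_instance

def pvWitness_work_on_gcode_file : List String :=
  ["G1 X1", ";LAYER:1", "M104", "; comment", "; Default end code", "G28"]

def Spec_work_on_gcode_file (sequence : List String) (out : List (List String)) : Prop :=
  out = work_on_gcode_file_alt sequence
instance (sequence : List String) (out : List (List String)) : Decidable (Spec_work_on_gcode_file sequence out) := by
  unfold Spec_work_on_gcode_file; infer_instance

-- ===== CLAIM (what is proved, stated in full; the proofs are below) =====
def Claim_equal_work_on_gcode_file : Prop := ∀ (sequence : List String), Dom_work_on_gcode_file sequence → Pre_work_on_gcode_file sequence → Spec_work_on_gcode_file sequence (work_on_gcode_file sequence)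

-- ===== LEMMAS AND PROOFS =====

-- the common recursive description both ports are reduced to
def pvSplit : List String → List (List String)
  | [] => [[]]
  | l :: ls =>
    if pvIsDelim l then [] :: pvSplit ls
    else ((if pvKeep l then [l] else []) ++ (pvSplit ls).headI) :: (pvSplit ls).tail

lemma pvSplit_ne_nil (ls : List String) : pvSplit ls ≠ [] := by
  cases ls <;> simp [pvSplit] <;> split <;> simp

lemma pvAppendLast_append (acc : List (List String)) (x : List String) (l : String) :
    pvAppendLast (acc ++ [x]) l = acc ++ [x ++ [l]] := by
  induction acc with
  | nil => simp [pvAppendLast]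
  | cons a as ih =>
    cases as with
    | nil => simp [pvAppendLast]
    | cons b bs => simpa [pvAppendLast] using ih

lemma pvAStep_eq (x : List String) (l : String) :
    pvAStep [x] l =
      if pvIsDelim l then [x] ++ [([] : List String)]
      else if pvKeep l then [x ++ [l]] else [x] := by
  unfold pvAStep
  by_cases hd : pvIsDelim l
  · have hc : (!(PySem.Str.isIn ";LAYER:" l) && !(PySem.Str.isIn "; Default end code" l)) = false := by
      unfold pvIsDelim at hd
      rcases Bool.or_eq_true_iff.mp hd with h | h
      · rw [h]; simp only [Bool.not_true, Bool.false_and]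
      · rw [h]; simp only [Bool.not_true, Bool.and_false]
    rw [hc, if_pos hd]
    simp only [Bool.false_eq_true, if_false]
  · have hc : (!(PySem.Str.isIn ";LAYER:" l) && !(PySem.Str.isIn "; Default end code" l)) = true := by
      unfold pvIsDelim at hd
      simp only [Bool.or_eq_true_iff, not_or, Bool.not_eq_true] at hd
      rw [hd.1, hd.2]; rfl
    rw [hc, if_pos rfl, if_neg hd]
    unfold pvKeep
    cases hg : PySem.Str.pyGet? l 0 with
    | none => simp
    | some c => by_cases hcs : c = ';' <;> simp [hcs, pvAppendLast]

lemma pvAStep_append (acc : List (List String)) (x : List String) (l : String) :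
    pvAStep (acc ++ [x]) l = acc ++ pvAStep [x] l := by
  unfold pvAStep
  split
  · cases h : PySem.Str.pyGet? l 0 with
    | none => simp
    | some c =>
      by_cases hc : c = ';' <;> simp [hc, pvAppendLast_append, pvAppendLast]
  · simp

lemma pvAStep_single_shape (x : List String) (l : String) :
    pvAStep [x] l = [x, ([] : List String)] ∨ ∃ w, pvAStep [x] l = [w] := by
  unfold pvAStep
  split
  · cases hg : PySem.Str.pyGet? l 0 with
    | none => exact Or.inr ⟨x, by simp⟩
    | some c =>
      by_cases hc : c = ';'
      · exact Or.inr ⟨x, by simp [hc]⟩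
      · exact Or.inr ⟨x ++ [l], by simp [hc, pvAppendLast]⟩
  · exact Or.inl rfl

lemma foldl_pvAStep_append (ls : List String) (acc : List (List String)) (x : List String) :
    List.foldl pvAStep (acc ++ [x]) ls = acc ++ List.foldl pvAStep [x] ls := by
  induction ls generalizing acc x with
  | nil => simp
  | cons l ls ih =>
    simp only [List.foldl_cons, pvAStep_append]
    rcases pvAStep_single_shape x l with h2 | ⟨w, h2⟩
    · rw [h2]
      have e1 : acc ++ [x, ([] : List String)] = (acc ++ [x]) ++ [([] : List String)] := by simp
      have e2 : ([x, ([] : List String)]) = [x] ++ [([] : List String)] := rfl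
      rw [e1, ih (acc ++ [x]) [], e2]
      conv_rhs => rw [show ([x] ++ [([] : List String)]) = ([x] : List (List String)) ++ [([] : List String)] from rfl, ih [x] []]
      simp
    · rw [h2]
      exact ih acc w

lemma foldl_pvAStep_single (ls : List String) (x : List String) :
    List.foldl pvAStep [x] ls = (x ++ (pvSplit ls).headI) :: (pvSplit ls).tail := by
  induction ls generalizing x with
  | nil => simp [pvSplit]
  | cons l ls ih =>
    rw [List.foldl_cons, pvAStep_eq]
    by_cases hd : pvIsDelim l
    · obtain ⟨h0, t0, hsp⟩ : ∃ h0 t0, pvSplit ls = h0 :: t0 := by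
        cases h : pvSplit ls with
        | nil => exact absurd h (pvSplit_ne_nil ls)
        | cons a b => exact ⟨a, b, rfl⟩
      rw [if_pos hd, foldl_pvAStep_append ls [x] [], ih []]
      simp [pvSplit, hd, hsp]
    · rw [if_neg hd]
      by_cases hk : pvKeep l
      · rw [if_pos hk, ih]
        simp [pvSplit, hd, hk]
      · rw [if_neg hk, ih]
        simp [pvSplit, hd, hk]

lemma portA_eq_pvSplit (seq : List String) : work_on_gcode_file seq = pvSplit seq := by
  unfold work_on_gcode_file
  rw [show ([[]] : List (List String)) = [([] : List String)] from rfl, foldl_pvAStep_single]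
  cases h : pvSplit seq with
  | nil => exact absurd h (pvSplit_ne_nil seq)
  | cons a b => simp [h]

-- B-side: bounds with a generalized enumerate start
def pvBoundsFrom (s : Int) (seq : List String) : List Int :=
  ((PySem.List.enumerate seq s).filter (fun p => pvIsDelim p.2)).map (·.1)

lemma pvBoundsFrom_cons (s : Int) (x : String) (xs : List String) :
    pvBoundsFrom s (x :: xs) =
      if pvIsDelim x then s :: pvBoundsFrom (s + 1) xs else pvBoundsFrom (s + 1) xs := by
  unfold pvBoundsFrom
  rw [PySem.List.enumerate_cons]
  by_cases h : pvIsDelim x <;> simp [h]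

lemma pvBoundsFrom_shift (s : Int) (xs : List String) :
    pvBoundsFrom (s + 1) xs = (pvBoundsFrom s xs).map (· + 1) := by
  induction xs generalizing s with
  | nil => simp [pvBoundsFrom]
  | cons x xs ih =>
    rw [pvBoundsFrom_cons, pvBoundsFrom_cons]
    by_cases h : pvIsDelim x <;> simp [h, ih]

lemma pvBoundsFrom_nonneg (s : Int) (xs : List String) (hs : 0 ≤ s) :
    ∀ b ∈ pvBoundsFrom s xs, 0 ≤ b := by
  induction xs generalizing s with
  | nil => simp [pvBoundsFrom]
  | cons x xs ih =>
    rw [pvBoundsFrom_cons]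
    intro b hb
    by_cases h : pvIsDelim x
    · simp [h] at hb
      rcases hb with rfl | hb
      · exact hs
      · exact ih (s + 1) (by omega) b hb
    · simp [h] at hb
      exact ih (s + 1) (by omega) b hb

lemma slice_shift (x : String) (xs : List String) (a b : Int) (ha : 0 ≤ a) (hb : 0 ≤ b) :
    PySem.List.slice (x :: xs) (some (a + 1)) (some (b + 1)) =
      PySem.List.slice xs (some a) (some b) := by
  rw [PySem.List.slice_toNat (x :: xs) (by omega) (by omega),
      PySem.List.slice_toNat xs ha hb]
  have h1 : (a + 1).toNat = a.toNat + 1 := by omega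
  have h2 : (b + 1).toNat = b.toNat + 1 := by omega
  simp [h1, h2]

lemma slice_zero_succ (x : String) (xs : List String) (b : Int) (hb : 0 ≤ b) :
    PySem.List.slice (x :: xs) (some 0) (some (b + 1)) =
      x :: PySem.List.slice xs (some 0) (some b) := by
  rw [PySem.List.slice_toNat (x :: xs) le_rfl (by omega),
      PySem.List.slice_toNat xs le_rfl hb]
  have h2 : (b + 1).toNat = b.toNat + 1 := by omega
  simp [h2]

lemma zip_shift (S E : List Int) :
    (S.map (· + 1)).zip (E.map (· + 1)) = (S.zip E).map (fun p => (p.1 + 1, p.2 + 1)) := by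
  induction S generalizing E with
  | nil => simp
  | cons a S ih =>
    cases E with
    | nil => simp
    | cons e E => simp [ih]

-- the zip-of-boundaries expression work_on_gcode_file_alt evaluates (lets unfolded)
lemma alt_eq (seq : List String) :
    work_on_gcode_file_alt seq =
      ((0 :: (pvBoundsFrom 0 seq).map (· + 1)).zip (pvBoundsFrom 0 seq ++ [(seq.length : Int)])).map
        (fun p => (PySem.List.slice seq (some p.1) (some p.2)).filter pvKeep) := rfl

lemma segs_shift (x : String) (xs : List String) (S E : List Int)
    (hS : ∀ a ∈ S, 0 ≤ a) (hE : ∀ b ∈ E, 0 ≤ b) :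
    ((S.map (· + 1)).zip (E.map (· + 1))).map
        (fun p => (PySem.List.slice (x :: xs) (some p.1) (some p.2)).filter pvKeep) =
      (S.zip E).map (fun p => (PySem.List.slice xs (some p.1) (some p.2)).filter pvKeep) := by
  rw [zip_shift, List.map_map]
  apply List.map_congr_left
  intro p hp
  rcases List.of_mem_zip hp with ⟨h1, h2⟩
  simp only [Function.comp_apply]
  exact congrArg (List.filter pvKeep) (slice_shift x xs p.1 p.2 (hS _ h1) (hE _ h2))

lemma portB_eq_pvSplit (seq : List String) : work_on_gcode_file_alt seq = pvSplit seq := by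
  induction seq with
  | nil =>
    rw [alt_eq]
    have h0 : pvBoundsFrom 0 ([] : List String) = [] := by
      simp [pvBoundsFrom, PySem.List.enumerate_nil]
    rw [h0]
    simp only [List.map_nil, List.nil_append, List.length_nil, Nat.cast_zero,
      List.zip_cons_cons, List.zip_nil_right, List.zip_nil_left, List.map_cons, List.map_nil]
    rw [PySem.List.slice_toNat ([] : List String) le_rfl le_rfl]
    simp [pvSplit]
  | cons x xs ih =>
    rw [alt_eq] at ih ⊢
    rw [pvBoundsFrom_cons, show ((0 : Int) + 1) = 0 + 1 from rfl, pvBoundsFrom_shift]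
    set b0 := pvBoundsFrom 0 xs with hb0
    have hnn : ∀ b ∈ b0, 0 ≤ b := pvBoundsFrom_nonneg 0 xs le_rfl
    have hlen : ((x :: xs).length : Int) = (xs.length : Int) + 1 := by
      simp [List.length_cons]
    have hnnS : ∀ a ∈ (0 : Int) :: b0.map (· + 1), 0 ≤ a := by
      intro a ha
      rcases List.mem_cons.mp ha with rfl | ha
      · exact le_rfl
      · rcases List.mem_map.mp ha with ⟨c, hc, rfl⟩
        have := hnn c hc; omega
    have hnnE : ∀ b ∈ b0 ++ [(xs.length : Int)], 0 ≤ b := by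
      intro b hb
      rcases List.mem_append.mp hb with hb | hb
      · exact hnn b hb
      · rcases List.mem_singleton.mp hb with rfl
        positivity
    by_cases hd : pvIsDelim x
    · rw [if_pos hd, hlen]
      -- starts = 0 :: (0 :: b0.map(+1)).map(+1), ends = (0 :: b0.map(+1)) ++ [len+1]
      have hends : ((0 : Int) :: b0.map (· + 1)) ++ [(xs.length : Int) + 1] =
          (0 : Int) :: ((b0 ++ [(xs.length : Int)]).map (· + 1)) := by
        simp
      rw [hends, List.zip_cons_cons, List.map_cons]
      have hsl : PySem.List.slice (x :: xs) (some 0) (some 0) = ([] : List String) := by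
        rw [PySem.List.slice_toNat (x :: xs) le_rfl le_rfl]; simp
      rw [hsl]
      rw [segs_shift x xs _ _ hnnS hnnE, ih]
      obtain ⟨h0, t0, hsp⟩ : ∃ h0 t0, pvSplit xs = h0 :: t0 := by
        cases h : pvSplit xs with
        | nil => exact absurd h (pvSplit_ne_nil xs)
        | cons a b => exact ⟨a, b, rfl⟩
      simp [pvSplit, hd, hsp]
    · rw [if_neg hd, hlen]
      obtain ⟨e0, E, hE⟩ : ∃ e0 E, b0 ++ [(xs.length : Int)] = e0 :: E := by
        cases h : b0 ++ [(xs.length : Int)] with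
        | nil => simp at h
        | cons a b => exact ⟨a, b, rfl⟩
      have he0 : 0 ≤ e0 := hnnE e0 (by rw [hE]; exact List.mem_cons_self ..)
      have hnnE' : ∀ b ∈ E, 0 ≤ b := fun b hb => hnnE b (by rw [hE]; exact List.mem_cons_of_mem _ hb)
      have hnnB1 : ∀ a ∈ b0.map (· + 1), 0 ≤ a := by
        intro a ha
        rcases List.mem_map.mp ha with ⟨c, hc, rfl⟩
        have := hnn c hc; omega
      -- ends = map(+1) (b0 ++ [len]) = (e0+1) :: map(+1) E
      have hends : (b0.map (· + 1)) ++ [(xs.length : Int) + 1] =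
          (e0 + 1) :: E.map (· + 1) := by
        have : (b0 ++ [(xs.length : Int)]).map (· + 1) = (e0 + 1) :: E.map (· + 1) := by
          rw [hE, List.map_cons]
        simpa using this
      rw [hends, List.zip_cons_cons, List.map_cons]
      -- ih with the ends list decomposed
      rw [hE, List.zip_cons_cons, List.map_cons] at ih
      -- head segment
      have hhead : PySem.List.slice (x :: xs) (some 0) (some (e0 + 1)) =
          x :: PySem.List.slice xs (some 0) (some e0) := slice_zero_succ x xs e0 he0
      simp only [hhead, List.filter_cons]
      -- tail segments
      rw [segs_shift x xs _ _ hnnB1 hnnE']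
      rw [pvSplit]
      simp only [hd, if_false]
      rw [← ih]
      simp only [List.headI, List.tail]
      by_cases hk : pvKeep x <;> simp [hk]

-- ===== VERDICT (by name: the statement is the Claim_ definition above) =====
theorem work_on_gcode_file_spec : Claim_equal_work_on_gcode_file := by
  intro seq _ _
  unfold Spec_work_on_gcode_file
  rw [portA_eq_pvSplit, portB_eq_pvSplit]
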